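-- pv_equiv track=rewrite | github.com/k-vijayaraghavan/parameterized_impedance.py | impedance_extend/models/circuits/fitting.py | extract_circuit_elements
-- ===== SOURCE A (Python) =====
-- ints = '0123456789'
--
-- def extract_circuit_elements(circuit):
--     """ Extracts circuit elements from a circuit string.
--
--     Parameters
--     ----------
--     circuit : str
--         Circuit string.
--
--     Returns
--     -------
--     extracted_elements : list
--         list of extracted elements.
--
--     """
--     p_string = [x for x in circuit if x not in 'p(),-']
--     extracted_elements = []
--     current_element = []
--     length = len(p_string)
--     for i, char in enumerate(p_string):
--         if char not in ints:
--             current_element.append(char)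
--         else:
--             # min to prevent looking ahead past end of list
--             if p_string[min(i+1, length-1)] not in ints:
--                 current_element.append(char)
--                 extracted_elements.append(''.join(current_element))
--                 current_element = []
--             else:
--                 current_element.append(char)
--     extracted_elements.append(''.join(current_element))
--     return extracted_elements
-- ===== SOURCE B (Python) =====
-- ints = '0123456789'
--
-- def extract_circuit_elements(circuit):
--     """Two-phase re-implementation: compute cut positions, then slice."""
--     s = [x for x in circuit if x not in 'p(),-']
--     cuts = [0] + [i + 1 for i in range(len(s) - 1)
--                   if s[i] in ints and s[i + 1] not in ints] + [len(s)]
--     return [''.join(s[a:b]) for a, b in zip(cuts, cuts[1:])]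
-- ===== Notes on version B (the rewrite author's own statement) =====
-- stated objective: alternative
-- what changed: A accumulates a current-element buffer while scanning with an enumerate loop and a min-clamped lookahead; B instead computes the list of cut positions (every index where a digit is followed by a non-digit) and then slices the filtered string at those positions.
import Mathlib
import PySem

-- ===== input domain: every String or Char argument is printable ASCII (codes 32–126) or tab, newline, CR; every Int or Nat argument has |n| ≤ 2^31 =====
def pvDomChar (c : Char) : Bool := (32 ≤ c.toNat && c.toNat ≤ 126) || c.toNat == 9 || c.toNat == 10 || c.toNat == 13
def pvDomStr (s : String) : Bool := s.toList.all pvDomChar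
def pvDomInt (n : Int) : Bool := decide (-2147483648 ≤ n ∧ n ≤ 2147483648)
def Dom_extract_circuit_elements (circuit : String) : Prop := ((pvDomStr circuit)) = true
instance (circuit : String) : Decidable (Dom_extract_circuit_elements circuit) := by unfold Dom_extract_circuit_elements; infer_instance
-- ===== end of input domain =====

-- B replaces A's char-by-char buffer loop with a two-phase method (compute the cut
-- positions, then slice out the segments); same cost, different algorithm.

-- ===== PORT A =====
-- literal transliteration of A: filter, then an enumerate loop with a min-clamped lookahead.
-- p_string[min(i+1, length-1)] is always in range while the loop runs, so pyGetD (default never used) is exact.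
def extract_circuit_elements (circuit : String) : List String :=
  let ints : List Char := "0123456789".toList
  let p_string : List Char := circuit.toList.filter (fun x => !(("p(),-".toList).contains x))
  let length : Int := (p_string.length : Int)
  let st := (PySem.List.enumerate p_string).foldl
    (fun (st : List String × List Char) (ic : Int × Char) =>
      if !(ints.contains ic.2) then (st.1, st.2 ++ [ic.2])
      else if !(ints.contains (PySem.List.pyGetD p_string (min (ic.1 + 1) (length - 1)) ' ')) then
        (st.1 ++ [String.ofList (st.2 ++ [ic.2])], [])
      else (st.1, st.2 ++ [ic.2]))
    (([] : List String), ([] : List Char))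
  st.1 ++ [String.ofList st.2]

-- ===== PORT B =====
-- literal transliteration of B: filter, cut positions (a digit followed by a non-digit), then slice.
-- s[i] and s[i+1] have i drawn from range(len(s)-1), so both are in range; pyGetD is exact.
def extract_circuit_elements_alt (circuit : String) : List String :=
  let ints : List Char := "0123456789".toList
  let s : List Char := circuit.toList.filter (fun x => !(("p(),-".toList).contains x))
  let cuts : List Int :=
    [0] ++ ((PySem.List.pyRange 0 ((s.length : Int) - 1) 1).filter (fun i =>
        ints.contains (PySem.List.pyGetD s i ' ') &&
        !(ints.contains (PySem.List.pyGetD s (i + 1) ' ')))).map (· + 1)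
      ++ [(s.length : Int)]
  (cuts.zip cuts.tail).map (fun ab => String.ofList (PySem.List.slice s (some ab.1) (some ab.2)))

-- ===== PRECONDITION & SPEC =====
def Spec_extract_circuit_elements (circuit : String) (out : List String) : Prop := out = extract_circuit_elements_alt circuit
instance (circuit : String) (out : List String) : Decidable (Spec_extract_circuit_elements circuit out) := by unfold Spec_extract_circuit_elements; infer_instance

-- ===== CLAIM (what is proved, stated in full; the proofs are below) =====
def Claim_equal_extract_circuit_elements : Prop := ∀ (circuit : String), Dom_extract_circuit_elements circuit → Spec_extract_circuit_elements circuit (extract_circuit_elements circuit)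

-- ===== LEMMAS AND PROOFS =====

def isDig (c : Char) : Bool := ("0123456789".toList).contains c

def headND : List Char → Bool
  | [] => false
  | d :: _ => !isDig d

-- canonical recursive splitter both ports are reduced to
def goL : List Char → List Char → List (List Char)
  | [], cur => [cur]
  | c :: rest, cur =>
    if isDig c && headND rest then (cur ++ [c]) :: goL rest []
    else goL rest (cur ++ [c])

-- cut indices of B (a cut after position i), in Nat form
def cutsN (s : List Char) : List Nat :=
  (List.range (s.length - 1)).filter (fun i => isDig (s.getD i ' ') && !isDig (s.getD (i + 1) ' '))

def allC (s : List Char) : List Nat := 0 :: ((cutsN s).map (· + 1) ++ [s.length])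

def segsL (s : List Char) : List (List Char) :=
  ((allC s).zip (allC s).tail).map (fun ab => (s.drop ab.1).take (ab.2 - ab.1))

-- A's loop body, named
def stepA (l : List Char) (st : List String × List Char) (ic : Int × Char) : List String × List Char :=
  if !(isDig ic.2) then (st.1, st.2 ++ [ic.2])
  else if !(isDig (PySem.List.pyGetD l (min (ic.1 + 1) ((l.length : Int) - 1)) ' ')) then
    (st.1 ++ [String.ofList (st.2 ++ [ic.2])], [])
  else (st.1, st.2 ++ [ic.2])

-- ===== A side: the enumerate/lookahead fold is the recursive splitter =====

lemma foldA_eq_goL (l : List Char) (suf : List Char) : ∀ (k : Nat), l.drop k = suf →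
    ∀ (ext : List String) (cur : List Char),
    (((PySem.List.enumerate suf (k : Int)).foldl (stepA l) (ext, cur)).1
      ++ [String.ofList ((PySem.List.enumerate suf (k : Int)).foldl (stepA l) (ext, cur)).2])
    = ext ++ (goL suf cur).map String.ofList := by
  induction suf with
  | nil =>
    intro k hk ext cur
    simp [PySem.List.enumerate, goL]
  | cons c rest ih =>
    intro k hk ext cur
    have hk1 : l.drop (k + 1) = rest := by rw [← List.tail_drop, hk]; rfl
    have hlen : l.length = k + 1 + rest.length := by
      have := congrArg List.length hk
      simp [List.length_drop] at this
      omega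
    have hgetk : l[k]? = some c := by
      have h := congrArg (fun t => t[0]?) hk
      simpa [List.getElem?_drop] using h
    rw [PySem.List.enumerate_cons, List.foldl_cons]
    by_cases hdc : isDig c
    · cases rest with
      | nil =>
        have hmin : min ((k : Int) + 1) ((l.length : Int) - 1) = (k : Int) := by
          simp at hlen
          omega
        have hla : PySem.List.pyGetD l ((k : Int)) ' ' = c := by
          rw [PySem.List.pyGetD_natCast]
          simp [List.getD, hgetk]
        have hstep : stepA l (ext, cur) ((k : Int), c) = (ext, cur ++ [c]) := by
          simp [stepA, hdc, hmin, hla]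
        rw [hstep]
        have := ih (k + 1) hk1 ext (cur ++ [c])
        push_cast at this
        rw [this]
        simp [goL, headND, hdc]
      | cons d rest2 =>
        have hgetk1 : l[k + 1]? = some d := by
          have h := congrArg (fun t => t[0]?) hk1
          simpa [List.getElem?_drop] using h
        have hmin : min ((k : Int) + 1) ((l.length : Int) - 1) = (k : Int) + 1 := by
          simp at hlen
          omega
        have hla : PySem.List.pyGetD l ((k : Int) + 1) ' ' = d := by
          have hcast : (k : Int) + 1 = ((k + 1 : Nat) : Int) := by push_cast; ring
          rw [hcast, PySem.List.pyGetD_natCast]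
          simp [List.getD, hgetk1]
        by_cases hdd : isDig d
        · have hstep : stepA l (ext, cur) ((k : Int), c) = (ext, cur ++ [c]) := by
            simp [stepA, hdc, hmin, hla, hdd]
          rw [hstep]
          have := ih (k + 1) hk1 ext (cur ++ [c])
          push_cast at this
          rw [this]
          simp [goL, headND, hdc, hdd]
        · have hstep : stepA l (ext, cur) ((k : Int), c)
              = (ext ++ [String.ofList (cur ++ [c])], []) := by
            simp [stepA, hdc, hmin, hla, hdd]
          rw [hstep]
          have := ih (k + 1) hk1 (ext ++ [String.ofList (cur ++ [c])]) []
          push_cast at this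
          rw [this]
          simp [goL, headND, hdc, hdd]
    · have hstep : stepA l (ext, cur) ((k : Int), c) = (ext, cur ++ [c]) := by
        simp [stepA, hdc]
      rw [hstep]
      have := ih (k + 1) hk1 ext (cur ++ [c])
      push_cast at this
      rw [this]
      simp [goL, headND, hdc]

lemma A_eq_goL (circuit : String) :
    extract_circuit_elements circuit
      = (goL (circuit.toList.filter (fun x => !(("p(),-".toList).contains x))) []).map String.ofList := by
  have h := foldA_eq_goL (circuit.toList.filter (fun x => !(("p(),-".toList).contains x)))
    (circuit.toList.filter (fun x => !(("p(),-".toList).contains x))) 0 rfl [] []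
  rw [List.nil_append] at h
  exact h

-- ===== B side: the cut/slice pipeline is the recursive splitter =====

lemma cutsN_cons (c : Char) (rest : List Char) :
    cutsN (c :: rest) = (if isDig c && headND rest then [0] else []) ++ (cutsN rest).map (· + 1) := by
  cases rest with
  | nil => simp [cutsN, headND]
  | cons d rest' =>
    unfold cutsN
    simp only [List.length_cons, Nat.add_sub_cancel, List.range_succ_eq_map]
    rw [List.filter_cons, List.filter_map]
    simp [headND, Function.comp_def]
    split_ifs <;> simp

lemma segsL_ne_nil (s : List Char) : segsL s ≠ [] := by
  have : (segsL s).length ≠ 0 := by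
    simp [segsL, allC, List.length_zip]
  exact fun h => this (by simp [h])

lemma zip_map_succ (u v : List Nat) :
    (u.map (· + 1)).zip (v.map (· + 1)) = (u.zip v).map (fun ab => (ab.1 + 1, ab.2 + 1)) := by
  rw [List.zip_map]; rfl

lemma zip_cons_map_succ (h0 : Nat) (t0 v : List Nat) :
    ((h0 + 1) :: t0.map (· + 1)).zip (v.map (· + 1))
      = ((h0 :: t0).zip v).map (fun ab => (ab.1 + 1, ab.2 + 1)) := by
  show ((h0 :: t0).map (· + 1)).zip (v.map (· + 1)) = _
  exact zip_map_succ _ _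

lemma segs_shift (s' : List Char) (c : Char) (u v : List Nat) :
    ((u.zip v).map (fun ab => (ab.1 + 1, ab.2 + 1))).map
        (fun ab => ((c :: s').drop ab.1).take (ab.2 - ab.1))
      = (u.zip v).map (fun ab => (s'.drop ab.1).take (ab.2 - ab.1)) := by
  rw [List.map_map]
  simp [Function.comp_def, Nat.add_sub_add_right]

lemma segsL_cons_cut (c : Char) (rest : List Char) (h : (isDig c && headND rest) = true) :
    segsL (c :: rest) = [c] :: segsL rest := by
  have hc : allC (c :: rest) = 0 :: (allC rest).map (· + 1) := by
    simp [allC, cutsN_cons, h]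
  unfold segsL
  rw [hc]
  have h1 : allC rest = 0 :: ((cutsN rest).map (· + 1) ++ [rest.length]) := rfl
  rw [h1]
  simp only [List.map_cons, List.tail_cons, List.zip_cons_cons, List.map_cons]
  rw [← List.map_cons (f := (· + 1)) (a := 0), zip_map_succ, segs_shift]
  simp

lemma segsL_cons_nocut (c : Char) (rest : List Char) (h : (isDig c && headND rest) = false) :
    segsL (c :: rest) = match segsL rest with
      | [] => [[c]]
      | h :: t => (c :: h) :: t := by
  have hc : allC (c :: rest) = 0 :: ((cutsN rest).map (· + 1) ++ [rest.length]).map (· + 1) := by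
    simp [allC, cutsN_cons, h]
  rcases he : (cutsN rest).map (· + 1) ++ [rest.length] with _ | ⟨h0, t0⟩
  · simp at he
  · have hrest : segsL rest
        = (rest.take h0) :: ((h0 :: t0).zip t0).map (fun ab => (rest.drop ab.1).take (ab.2 - ab.1)) := by
      unfold segsL allC
      rw [he]
      simp [List.zip_cons_cons]
    have hdone : segsL (c :: rest)
        = ((c :: rest).take (h0 + 1))
            :: ((h0 :: t0).zip t0).map (fun ab => (rest.drop ab.1).take (ab.2 - ab.1)) := by
      unfold segsL
      rw [hc, he]
      simp only [List.map_cons, List.tail_cons, List.zip_cons_cons, List.map_cons]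
      rw [zip_cons_map_succ, segs_shift]
      simp
    rw [hdone, hrest]
    simp

lemma goL_eq_segsL : ∀ (s cur : List Char),
    goL s cur = match segsL s with
      | [] => [cur]
      | h :: t => (cur ++ h) :: t := by
  intro s
  induction s with
  | nil =>
    intro cur
    have h0 : segsL ([] : List Char) = [[]] := rfl
    rw [h0]
    simp [goL]
  | cons c rest ih =>
    intro cur
    by_cases hcut : (isDig c && headND rest) = true
    · rw [segsL_cons_cut c rest hcut]
      simp only [goL]
      rw [if_pos hcut, ih []]
      cases hs : segsL rest with
      | nil => exact absurd hs (segsL_ne_nil rest)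
      | cons h0 t0 => simp
    · have hcut' : (isDig c && headND rest) = false := by simpa using hcut
      rw [segsL_cons_nocut c rest hcut']
      simp only [goL]
      rw [if_neg (by simp [hcut']), ih (cur ++ [c])]
      cases hs : segsL rest with
      | nil => exact absurd hs (segsL_ne_nil rest)
      | cons h0 t0 => simp

lemma pyRange_filter (s : List Char) :
    (PySem.List.pyRange 0 ((s.length : Int) - 1) 1).filter (fun i =>
        ("0123456789".toList).contains (PySem.List.pyGetD s i ' ') &&
        !(("0123456789".toList).contains (PySem.List.pyGetD s (i + 1) ' ')))
    = (cutsN s).map (fun n : Nat => (n : Int)) := by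
  rw [PySem.List.pyRange_one]
  have hm : (((s.length : Int) - 1) - 0).toNat = s.length - 1 := by omega
  rw [hm, List.filter_map]
  unfold cutsN
  have hfun : ∀ i ∈ List.range (s.length - 1),
      ((fun j => ("0123456789".toList).contains (PySem.List.pyGetD s j ' ') &&
          !(("0123456789".toList).contains (PySem.List.pyGetD s (j + 1) ' '))) ∘
        (fun k : Nat => (0 : Int) + ↑k)) i
      = (fun i => isDig (s.getD i ' ') && !isDig (s.getD (i + 1) ' ')) i := by
    intro i _
    simp only [Function.comp_def, zero_add, isDig]
    have hcast : (i : Int) + 1 = ((i + 1 : Nat) : Int) := by push_cast; ring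
    rw [hcast, PySem.List.pyGetD_natCast, PySem.List.pyGetD_natCast]
  rw [List.filter_congr hfun]
  simp only [zero_add]

lemma cuts_eq (s : List Char) :
    ([(0 : Int)] ++ ((cutsN s).map (fun n : Nat => (n : Int))).map (· + 1) ++ [(s.length : Int)])
      = (allC s).map (fun n : Nat => (n : Int)) := by
  unfold allC
  rw [List.map_cons, List.map_append, List.map_map, List.map_map]
  have hcomp : ((fun x : Int => x + 1) ∘ (fun n : Nat => (n : Int)))
      = ((fun n : Nat => (n : Int)) ∘ (fun x => x + 1)) := by
    funext n; simp
  rw [hcomp]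
  simp

lemma zip_map_coe_slice (s : List Char) (u v : List Nat) :
    ((u.map (fun n : Nat => (n : Int))).zip (v.map (fun n : Nat => (n : Int)))).map
        (fun ab => String.ofList (PySem.List.slice s (some ab.1) (some ab.2)))
      = (u.zip v).map (fun ab => String.ofList ((s.drop ab.1).take (ab.2 - ab.1))) := by
  rw [List.zip_map, List.map_map]
  apply List.map_congr_left
  rintro ⟨a, b⟩ _
  simp [Prod.map, PySem.List.slice_natCast]

lemma alt_eq_segsL (circuit : String) :
    extract_circuit_elements_alt circuit
      = (segsL (circuit.toList.filter (fun x => !(("p(),-".toList).contains x)))).map String.ofList := by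
  unfold extract_circuit_elements_alt
  simp only [pyRange_filter, cuts_eq]
  rw [← List.map_tail, zip_map_coe_slice]
  unfold segsL
  rw [List.map_map]
  rfl

-- ===== VERDICT (by name: the statement is the Claim_ definition above) =====
theorem extract_circuit_elements_spec : Claim_equal_extract_circuit_elements := by
  intro circuit _
  unfold Spec_extract_circuit_elements
  rw [A_eq_goL, alt_eq_segsL, goL_eq_segsL]
  cases hs : segsL (circuit.toList.filter (fun x => !(("p(),-".toList).contains x))) with
  | nil => exact absurd hs (segsL_ne_nil _)
  | cons h0 t0 => simp
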